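-- pv_equiv track=rewrite | github.com/lawrencecchen/impartial | playground/news_analyzer.py | balance_relevant_articles
-- ===== SOURCE A (Python) =====
-- def balance_relevant_articles(target_bias, relevant_articles):
--     if not target_bias:
--         return relevant_articles
--
--     unrated_articles = []
--     rated_articles = []
--     target_bias_rating = target_bias.get("bias_rating")
--
--     try:
--
--         for article in relevant_articles:
--             if int(article["bias"]["bias_rating"]) == 2690:
--                 unrated_articles.append(article)
--             else:
--                 rated_articles.append(article)
--
--         if target_bias_rating == 71 or target_bias_rating == 72:
--             for index, article in enumerate(rated_articles):
--                 cur_article_bias = article["bias"]["bias_rating"]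
--                 if cur_article_bias == 74 or cur_article_bias == 75:
--                     rated_articles[index], rated_articles[0] == rated_articles[
--                         0
--                     ], rated_articles[index]
--                     break
--
--         if target_bias_rating == 74 or target_bias_rating == 75:
--             for index, article in enumerate(rated_articles):
--                 cur_article_bias = article["bias"]["bias_rating"]
--                 if cur_article_bias == 71 or cur_article_bias == 72:
--                     rated_articles[index], rated_articles[0] == rated_articles[
--                         0
--                     ], rated_articles[index]
--                     break
--         return [*rated_articles, *unrated_articles]
--
--     except:
--         return relevant_articles
-- ===== SOURCE B (Python) =====
-- def balance_relevant_articles(target_bias, relevant_articles):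
--     if not target_bias:
--         return relevant_articles
--     try:
--         # stable sort on a boolean key: unrated (2690) articles go to the back,
--         # everything else stays in front, both groups in original order
--         return sorted(
--             relevant_articles,
--             key=lambda article: int(article["bias"]["bias_rating"]) == 2690,
--         )
--     except:
--         return relevant_articles
-- ===== Notes on version B (the rewrite author's own statement) =====
-- stated objective: idiomatic
-- what changed: Replaces the explicit two-list partition loop (plus two dead swap loops that never mutate anything) with a single stable sorted() call on a boolean key that sends 2690-rated articles to the back.
import Mathlib
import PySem

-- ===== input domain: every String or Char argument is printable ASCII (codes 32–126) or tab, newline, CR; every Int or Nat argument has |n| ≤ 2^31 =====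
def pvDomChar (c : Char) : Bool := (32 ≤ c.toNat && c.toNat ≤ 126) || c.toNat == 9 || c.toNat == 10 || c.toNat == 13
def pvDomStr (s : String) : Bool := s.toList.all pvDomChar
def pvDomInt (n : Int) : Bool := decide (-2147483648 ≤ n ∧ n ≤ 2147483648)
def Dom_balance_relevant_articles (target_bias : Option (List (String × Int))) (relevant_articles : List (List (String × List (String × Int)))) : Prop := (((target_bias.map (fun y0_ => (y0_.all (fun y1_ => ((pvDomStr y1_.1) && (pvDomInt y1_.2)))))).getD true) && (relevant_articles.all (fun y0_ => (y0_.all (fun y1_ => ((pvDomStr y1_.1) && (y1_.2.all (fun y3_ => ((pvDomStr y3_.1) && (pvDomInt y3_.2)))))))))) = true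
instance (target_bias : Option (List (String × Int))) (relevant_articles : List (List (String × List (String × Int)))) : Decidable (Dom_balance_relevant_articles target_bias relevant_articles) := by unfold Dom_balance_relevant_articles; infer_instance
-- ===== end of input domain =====

-- B replaces A's explicit two-list partition loop (and its two dead swap loops, which never
-- mutate anything) with a single stable sort on the boolean key "rating == 2690" (idiomatic).

-- shared helper: first-match association-list lookup (Python dict subscript; none = KeyError)
def pvLookup {α : Type} (d : List (String × α)) (k : String) : Option α :=
  match d with
  | [] => none
  | (k', v) :: rest => if k' = k then some v else pvLookup rest k

-- ===== PORT A =====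
-- article["bias"]["bias_rating"] (none = KeyError, caught by A's bare except)
def pvRatingA (article : List (String × List (String × Int))) : Option Int :=
  match pvLookup article "bias" with
  | none => none
  | some d => pvLookup d "bias_rating"

-- A's first for-loop: build (unrated_articles, rated_articles); none = an exception inside the try
def pvPartitionA (articles : List (List (String × List (String × Int))))
    (unrated rated : List (List (String × List (String × Int)))) :
    Option (List (List (String × List (String × Int))) × List (List (String × List (String × Int)))) :=
  match articles with
  | [] => some (unrated, rated)
  | a :: rest =>
    match pvRatingA a with
    | none => none
    | some b =>
      if b = 2690 then pvPartitionA rest (unrated ++ [a]) rated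
      else pvPartitionA rest unrated (rated ++ [a])

-- A's dead swap loops: look up each rating until one of t1/t2 is found (the tuple-comparison
-- statement mutates nothing, so only the lookups matter; none = an exception inside the try)
def pvSwapScanA (rated : List (List (String × List (String × Int)))) (t1 t2 : Int) : Option Unit :=
  match rated with
  | [] => some ()
  | a :: rest =>
    match pvRatingA a with
    | none => none
    | some cur => if cur = t1 ∨ cur = t2 then some () else pvSwapScanA rest t1 t2

def balance_relevant_articles (target_bias : Option (List (String × Int))) (relevant_articles : List (List (String × List (String × Int)))) : List (List (String × List (String × Int))) :=
  match target_bias with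
  | none => relevant_articles
  | some tb =>
    if tb = [] then relevant_articles
    else
      let target_bias_rating := pvLookup tb "bias_rating"
      match pvPartitionA relevant_articles [] [] with
      | none => relevant_articles
      | some (unrated, rated) =>
        match (if target_bias_rating = some 71 ∨ target_bias_rating = some 72 then pvSwapScanA rated 74 75 else some ()) with
        | none => relevant_articles
        | some _ =>
          match (if target_bias_rating = some 74 ∨ target_bias_rating = some 75 then pvSwapScanA rated 71 72 else some ()) with
          | none => relevant_articles
          | some _ => rated ++ unrated

-- ===== PORT B =====
-- B's sort key: int(article["bias"]["bias_rating"]) == 2690 (none = KeyError raised by the key)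
def pvKeyB (article : List (String × List (String × Int))) : Option Bool :=
  match pvLookup article "bias" with
  | none => none
  | some d =>
    match pvLookup d "bias_rating" with
    | none => none
    | some r => some (decide (r = 2690))

def balance_relevant_articles_alt (target_bias : Option (List (String × Int))) (relevant_articles : List (List (String × List (String × Int)))) : List (List (String × List (String × Int))) :=
  match target_bias with
  | none => relevant_articles
  | some tb =>
    if tb = [] then relevant_articles
    else
      -- guard = "no key raises"; then sorted(relevant_articles, key=...) with the boolean key
      if relevant_articles.all (fun a => (pvKeyB a).isSome) then
        PySem.List.sorted relevant_articles (fun a => (pvKeyB a).getD false) false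
      else relevant_articles

-- ===== PRECONDITION & SPEC =====
def Spec_balance_relevant_articles (target_bias : Option (List (String × Int))) (relevant_articles : List (List (String × List (String × Int)))) (out : List (List (String × List (String × Int)))) : Prop := out = balance_relevant_articles_alt target_bias relevant_articles
instance (target_bias : Option (List (String × Int))) (relevant_articles : List (List (String × List (String × Int)))) (out : List (List (String × List (String × Int)))) : Decidable (Spec_balance_relevant_articles target_bias relevant_articles out) := by unfold Spec_balance_relevant_articles; infer_instance

-- ===== CLAIM (what is proved, stated in full; the proofs are below) =====
def Claim_equal_balance_relevant_articles : Prop := ∀ (target_bias : Option (List (String × Int))) (relevant_articles : List (List (String × List (String × Int)))), Dom_balance_relevant_articles target_bias relevant_articles → Spec_balance_relevant_articles target_bias relevant_articles (balance_relevant_articles target_bias relevant_articles)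

-- ===== LEMMAS AND PROOFS =====

-- the two key computations agree
lemma pvKeyB_eq_map (a : List (String × List (String × Int))) :
    pvKeyB a = (pvRatingA a).map (fun r => decide (r = 2690)) := by
  unfold pvKeyB pvRatingA
  cases pvLookup a "bias" with
  | none => rfl
  | some d => cases h : pvLookup d "bias_rating" <;> simp [h]

lemma pvKeyB_isSome (a : List (String × List (String × Int))) :
    (pvKeyB a).isSome = (pvRatingA a).isSome := by
  rw [pvKeyB_eq_map]; cases pvRatingA a <;> rfl

-- A's partition loop, when no lookup fails
lemma pvPartitionA_some (xs : List (List (String × List (String × Int))))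
    (un ra : List (List (String × List (String × Int))))
    (h : ∀ a ∈ xs, (pvRatingA a).isSome) :
    pvPartitionA xs un ra =
      some (un ++ xs.filter (fun a => (pvKeyB a).getD false),
            ra ++ xs.filter (fun a => !(pvKeyB a).getD false)) := by
  induction xs generalizing un ra with
  | nil => simp [pvPartitionA]
  | cons a rest ih =>
    have ha : (pvRatingA a).isSome := h a (by simp)
    obtain ⟨b, hb⟩ := Option.isSome_iff_exists.mp ha
    have hk : (pvKeyB a).getD false = decide (b = 2690) := by
      rw [pvKeyB_eq_map, hb]; rfl
    have hrest : ∀ x ∈ rest, (pvRatingA x).isSome := fun x hx => h x (by simp [hx])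
    by_cases h26 : b = 2690
    · simp [pvPartitionA, hb, h26, ih _ _ hrest, hk]
    · simp [pvPartitionA, hb, h26, ih _ _ hrest, hk]

-- A's partition loop, when some lookup fails
lemma pvPartitionA_none (xs : List (List (String × List (String × Int))))
    (un ra : List (List (String × List (String × Int))))
    (h : ¬ ∀ a ∈ xs, (pvRatingA a).isSome) :
    pvPartitionA xs un ra = none := by
  induction xs generalizing un ra with
  | nil => exact absurd (by simp) h
  | cons a rest ih =>
    cases hb : pvRatingA a with
    | none => simp [pvPartitionA, hb]
    | some b =>
      have hrest : ¬ ∀ x ∈ rest, (pvRatingA x).isSome := by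
        intro hall
        apply h
        intro x hx
        rcases List.mem_cons.mp hx with rfl | hx
        · simp [hb]
        · exact hall x hx
      by_cases h26 : b = 2690 <;> simp [pvPartitionA, hb, h26, ih _ _ hrest]

-- the dead swap loops never fail when every lookup succeeds
lemma pvSwapScanA_some (xs : List (List (String × List (String × Int)))) (t1 t2 : Int)
    (h : ∀ a ∈ xs, (pvRatingA a).isSome) : pvSwapScanA xs t1 t2 = some () := by
  induction xs with
  | nil => rfl
  | cons a rest ih =>
    obtain ⟨b, hb⟩ := Option.isSome_iff_exists.mp (h a (by simp))
    by_cases hc : b = t1 ∨ b = t2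
    · simp [pvSwapScanA, hb, hc]
    · simp [pvSwapScanA, hb, hc, ih (fun x hx => h x (by simp [hx]))]

-- stable insertion by a boolean key: a true-keyed element goes to the very end
lemma insertBy_boolKey_true {α : Type} (p : α → Bool) (x : α) (hx : p x = true)
    (L : List α) :
    PySem.List.insertBy (fun a b => decide (p a < p b)) x L = L ++ [x] := by
  induction L with
  | nil => rfl
  | cons y ys ih =>
    have : (decide (p x < p y)) = false := by cases hy : p y <;> simp [hx]
    simp [PySem.List.insertBy, this, ih]

-- a false-keyed element goes right between the false block and the true block
lemma insertBy_boolKey_false {α : Type} (p : α → Bool) (x : α) (hx : p x = false)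
    (F T : List α) (hF : ∀ y ∈ F, p y = false) (hT : ∀ y ∈ T, p y = true) :
    PySem.List.insertBy (fun a b => decide (p a < p b)) x (F ++ T) = F ++ x :: T := by
  induction F with
  | nil =>
    cases T with
    | nil => rfl
    | cons t ts =>
      have : (decide (p x < p t)) = true := by simp [hx, hT t (by simp)]
      simp [PySem.List.insertBy, this]
  | cons f fs ih =>
    have : (decide (p x < p f)) = false := by simp [hx, hF f (by simp)]
    simp [PySem.List.insertBy, this,
      ih (fun y hy => hF y (by simp [hy]))]

-- the whole insertion-sort fold by a boolean key is the stable partition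
lemma foldl_insertBy_boolKey {α : Type} (p : α → Bool) (xs F T : List α)
    (hF : ∀ y ∈ F, p y = false) (hT : ∀ y ∈ T, p y = true) :
    List.foldl (fun acc x => PySem.List.insertBy (fun a b => decide (p a < p b)) x acc) (F ++ T) xs
      = (F ++ xs.filter (fun x => !p x)) ++ (T ++ xs.filter p) := by
  induction xs generalizing F T with
  | nil => simp
  | cons x rest ih =>
    by_cases hx : p x = true
    · have h1 : PySem.List.insertBy (fun a b => decide (p a < p b)) x (F ++ T) = F ++ (T ++ [x]) := by
        rw [← List.append_assoc]; exact insertBy_boolKey_true p x hx (F ++ T)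
      have h2 := ih F (T ++ [x]) hF (by
        intro y hy; rcases List.mem_append.mp hy with hy | hy
        · exact hT y hy
        · simp at hy; subst hy; exact hx)
      simp only [List.foldl_cons, h1, h2, List.filter_cons, hx]
      simp
    · have hx' : p x = false := by simpa using hx
      have h1 := insertBy_boolKey_false p x hx' F T hF hT
      have h2 := ih (F ++ [x]) T (by
        intro y hy; rcases List.mem_append.mp hy with hy | hy
        · exact hF y hy
        · simp at hy; subst hy; exact hx') hT
      simp only [List.foldl_cons, h1]
      have : F ++ x :: T = (F ++ [x]) ++ T := by simp
      rw [this, h2]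
      simp [hx']

lemma sorted_boolKey {α : Type} (p : α → Bool) (xs : List α) :
    PySem.List.sorted xs p false = xs.filter (fun x => !p x) ++ xs.filter p := by
  have := foldl_insertBy_boolKey p xs [] [] (by simp) (by simp)
  simpa [PySem.List.sorted] using this

-- ===== VERDICT (by name: the statement is the Claim_ definition above) =====
theorem balance_relevant_articles_spec : Claim_equal_balance_relevant_articles := by
  intro target_bias relevant_articles _
  unfold Spec_balance_relevant_articles
  cases target_bias with
  | none => rfl
  | some tb =>
    by_cases htb : tb = []
    · simp [balance_relevant_articles, balance_relevant_articles_alt, htb]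
    · by_cases hall : ∀ a ∈ relevant_articles, (pvRatingA a).isSome
      · have hallB : relevant_articles.all (fun a => (pvKeyB a).isSome) = true := by
          simp only [List.all_eq_true]
          intro a ha; rw [pvKeyB_isSome]; exact hall a ha
        have hpart := pvPartitionA_some relevant_articles [] [] hall
        have hscan : ∀ t1 t2 : Int,
            pvSwapScanA (relevant_articles.filter (fun a => !(pvKeyB a).getD false)) t1 t2 = some () := by
          intro t1 t2
          exact pvSwapScanA_some _ t1 t2 (fun x hx => hall x (List.mem_of_mem_filter hx))
        have hif : ∀ (c : Prop) [Decidable c] (t1 t2 : Int),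
            (if c then pvSwapScanA (relevant_articles.filter (fun a => !(pvKeyB a).getD false)) t1 t2
             else some ()) = some () := by
          intro c _ t1 t2
          split
          · exact hscan t1 t2
          · rfl
        simp only [balance_relevant_articles, balance_relevant_articles_alt, if_neg htb,
          hpart, hallB, if_true, List.nil_append, hif,
          sorted_boolKey (fun a => (pvKeyB a).getD false) relevant_articles]
      · have hallB : relevant_articles.all (fun a => (pvKeyB a).isSome) = false := by
          simp only [List.all_eq_false]
          rw [not_forall] at hall
          simp only [not_forall, exists_prop] at hall
          obtain ⟨a, ha, hs⟩ := hall
          exact ⟨a, ha, by rw [pvKeyB_isSome]; simpa using hs⟩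
        simp [balance_relevant_articles, balance_relevant_articles_alt, htb,
          pvPartitionA_none relevant_articles [] [] hall, hallB]
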